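-- pv_equiv track=rewrite | github.com/nobe0716/problem_solving | codeforces/contests/1475/E. Advertising Agency.py | solve
-- ===== SOURCE A (Python) =====
-- import math
-- from collections import Counter
--
-- _MOD = 10 ** 9 + 7
--
-- def solve(n, k, a):
--     c = Counter(a)
--     for key in sorted(c.keys(), reverse=True):
--         num = c[key]
--         if k >= num:
--             k -= num
--         else:
--             # num_C_k
--             r = 1
--             return math.comb(num, k) % _MOD
--     return 1
-- ===== SOURCE B (Python) =====
-- import math
--
-- _MOD = 10 ** 9 + 7
--
-- def solve(n, k, a):
--     arr = sorted(a, reverse=True)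
--     if k <= 0 or k > len(arr):
--         return 1
--     v = arr[k - 1]                 # the k-th largest value (threshold)
--     needed = arr[:k].count(v)      # how many copies of v the top-k must contain
--     total = arr.count(v)           # how many copies of v are available
--     return math.comb(total, needed) % _MOD
-- ===== Notes on version B (the rewrite author's own statement) =====
-- stated objective: alternative
-- what changed: Instead of grouping values with a Counter and walking the distinct values in descending order subtracting group sizes, B sorts the whole list descending, reads the threshold value directly at index k-1 and takes two counts (copies of the threshold inside the top-k prefix and in the whole list), returning comb(total, needed) mod 1e9+7 with no group loop.
import Mathlib
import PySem

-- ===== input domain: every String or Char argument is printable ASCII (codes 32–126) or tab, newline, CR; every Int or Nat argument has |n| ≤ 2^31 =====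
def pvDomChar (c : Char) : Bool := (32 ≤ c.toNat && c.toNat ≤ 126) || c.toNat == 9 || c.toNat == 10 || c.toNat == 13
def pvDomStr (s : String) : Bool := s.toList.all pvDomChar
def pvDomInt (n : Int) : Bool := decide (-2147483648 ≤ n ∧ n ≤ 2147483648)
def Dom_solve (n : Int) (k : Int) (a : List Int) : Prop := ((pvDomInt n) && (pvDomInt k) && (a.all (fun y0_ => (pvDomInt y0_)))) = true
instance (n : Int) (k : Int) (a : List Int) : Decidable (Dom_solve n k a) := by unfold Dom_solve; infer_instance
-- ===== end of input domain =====

-- B replaces A's descending walk over Counter groups by direct indexing of the k-th largest in the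
-- fully sorted list plus two counts (alternative decomposition, same asymptotic cost).

-- ===== PORT A =====
def pvMOD : Int := 1000000007

-- the 'for key in sorted(c.keys(), reverse=True)' loop with its early return;
-- math.comb(num, k) is Nat.choose (exact: under Pre_ we have 0 ≤ k, and num is a count ≥ 0)
def solveLoop (c : PySem.Dict Int Int) (keys : List Int) (k : Int) : Int :=
  match keys with
  | [] => 1
  | key :: rest =>
    let num := c.getD key 0
    if num ≤ k then solveLoop c rest (k - num)
    else PySem.Int.mod ((Nat.choose num.toNat k.toNat : Nat) : Int) pvMOD

def solve (n : Int) (k : Int) (a : List Int) : Int :=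
  let c := PySem.Dict.counter a
  solveLoop c (PySem.List.sorted c.keys (fun x => x) true) k

-- ===== PORT B =====
def solve_alt (n : Int) (k : Int) (a : List Int) : Int :=
  let arr := PySem.List.sorted a (fun x => x) true
  if k ≤ 0 ∨ (arr.length : Int) < k then 1
  else
    let v := PySem.List.pyGetD arr (k - 1) 0   -- arr[k-1]; index in range when this branch is reached
    let needed := (PySem.List.slice arr none (some k)).count v
    let total := arr.count v
    PySem.Int.mod ((Nat.choose total needed : Nat) : Int) pvMOD

-- ===== PRECONDITION & SPEC =====
-- Pre_ excludes exactly the inputs on which A raises: with a nonempty list and k < 0,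
-- math.comb(num, k) gets a negative k and raises ValueError (A returns on everything else).
def Pre_solve (n : Int) (k : Int) (a : List Int) : Prop := 0 ≤ k ∨ a = []
instance (n : Int) (k : Int) (a : List Int) : Decidable (Pre_solve n k a) := by unfold Pre_solve; infer_instance
def pvWitness_solve : Int × Int × List Int := (3, 2, [1, 2, 2])

def Spec_solve (n : Int) (k : Int) (a : List Int) (out : Int) : Prop := out = solve_alt n k a
instance (n : Int) (k : Int) (a : List Int) (out : Int) : Decidable (Spec_solve n k a out) := by unfold Spec_solve; infer_instance

-- ===== CLAIM (what is proved, stated in full; the proofs are below) =====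
def Claim_equal_solve : Prop := ∀ (n : Int) (k : Int) (a : List Int), Dom_solve n k a → Pre_solve n k a → Spec_solve n k a (solve n k a)

-- ===== LEMMAS AND PROOFS =====

-- B's computation after the sort, as a function of the sorted list (solve_alt n k a = Bval (sorted a) k by rfl)
def Bval (arr : List Int) (k : Int) : Int :=
  if k ≤ 0 ∨ (arr.length : Int) < k then 1
  else
    let v := PySem.List.pyGetD arr (k - 1) 0
    let needed := (PySem.List.slice arr none (some k)).count v
    let total := arr.count v
    PySem.Int.mod ((Nat.choose total needed : Nat) : Int) pvMOD

lemma solve_alt_eq_Bval (n k : Int) (a : List Int) :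
    solve_alt n k a = Bval (PySem.List.sorted a (fun x => x) true) k := rfl

lemma bval_nil (k : Int) : Bval [] k = 1 := by
  unfold Bval
  rw [if_pos]
  simp only [List.length_nil, Int.natCast_zero]
  omega

-- a nonincreasing list whose maximum is v starts with all its copies of v, the rest are < v
lemma sorted_desc_group (s : List Int) (v : Int)
    (hs : s.Pairwise (fun a b => b ≤ a)) (hmax : ∀ y ∈ s, y ≤ v) :
    s.take (s.count v) = List.replicate (s.count v) v ∧ ∀ y ∈ s.drop (s.count v), y < v := by
  induction s with
  | nil => simp
  | cons x t ih =>
    rcases List.pairwise_cons.1 hs with ⟨hx, ht⟩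
    by_cases hxv : x = v
    · subst hxv
      have hmax' : ∀ y ∈ t, y ≤ x := hx
      obtain ⟨h1, h2⟩ := ih ht hmax'
      refine ⟨?_, ?_⟩
      · simp [List.count_cons_self, h1, List.replicate_succ]
      · simpa [List.count_cons_self] using h2
    · have hxlt : x < v := lt_of_le_of_ne (hmax x (List.mem_cons_self)) hxv
      have hcnt : (x :: t).count v = 0 := by
        rw [List.count_eq_zero]
        intro hv
        rcases List.mem_cons.1 hv with h | h
        · exact hxv h.symm
        · exact absurd (hx v h) (not_le.2 hxlt)
      rw [hcnt]
      refine ⟨rfl, ?_⟩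
      intro y hy
      simp only [List.drop_zero] at hy
      rcases List.mem_cons.1 hy with h | h
      · exact h ▸ hxlt
      · exact lt_of_le_of_lt (hx y h) hxlt

lemma slice_to_toNat (xs : List Int) (k : Int) (hk : 0 ≤ k) :
    PySem.List.slice xs none (some k) = xs.take k.toNat := by
  rw [← Int.toNat_of_nonneg hk, PySem.List.slice_to_natCast, Int.toNat_natCast]

-- consuming one whole group on B's side, when k covers it
lemma pyGetD_toNat (xs : List Int) (i : Int) (d : Int) (h : 0 ≤ i) :
    PySem.List.pyGetD xs i d = xs.getD i.toNat d := by
  rw [← Int.toNat_of_nonneg h, PySem.List.pyGetD_natCast, Int.toNat_natCast]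

lemma bval_group_le (m : Nat) (v : Int) (t : List Int) (k : Int)
    (hm : 1 ≤ m) (hvt : v ∉ t) (hmk : (m : Int) ≤ k) :
    Bval (List.replicate m v ++ t) k = Bval t (k - m) := by
  unfold Bval
  by_cases hbig : (t.length : Int) < k - m
  · rw [if_pos (Or.inr (by simp only [List.length_append, List.length_replicate]; push_cast; omega)),
      if_pos (Or.inr (by omega))]
  · rw [if_neg (by simp only [List.length_append, List.length_replicate]; push_cast; omega)]
    by_cases hkm : k = (m : Int)
    · -- k exactly uses up the leading group: both sides are 1
      rw [if_pos (Or.inl (by omega))]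
      have hidx : PySem.List.pyGetD (List.replicate m v ++ t) (k - 1) 0 = v := by
        rw [pyGetD_toNat _ _ _ (by omega),
          List.getD_append _ _ _ _ (by simp only [List.length_replicate]; omega),
          List.getD_replicate _ (by omega)]
      have hslice : PySem.List.slice (List.replicate m v ++ t) none (some k)
          = List.replicate m v := by
        rw [slice_to_toNat _ _ (by omega),
          List.take_append_of_le_length (by simp only [List.length_replicate]; omega),
          List.take_replicate]
        congr 1
        omega
      simp only [hidx, hslice, List.count_append, List.count_replicate,
        List.count_eq_zero.2 hvt, beq_self_eq_true, if_true, Nat.add_zero, Nat.choose_self]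
      decide
    · -- k goes past the leading group: drop it on both sides
      rw [if_neg (by omega)]
      have hlt : (k - (m : Int) - 1).toNat < t.length := by omega
      have hwt : t.getD (k - (m : Int) - 1).toNat 0 ∈ t := by
        rw [List.getD_eq_getElem _ _ hlt]
        exact List.getElem_mem _
      have hwv : t.getD (k - (m : Int) - 1).toNat 0 ≠ v := fun h => hvt (h ▸ hwt)
      have hidx : PySem.List.pyGetD (List.replicate m v ++ t) (k - 1) 0
          = t.getD (k - (m : Int) - 1).toNat 0 := by
        rw [pyGetD_toNat _ _ _ (by omega),
          List.getD_append_right _ _ _ _ (by simp only [List.length_replicate]; omega)]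
        simp only [List.length_replicate]
        congr 1
        omega
      have hidx' : PySem.List.pyGetD t (k - (m : Int) - 1) 0
          = t.getD (k - (m : Int) - 1).toNat 0 := pyGetD_toNat _ _ _ (by omega)
      have hslice : PySem.List.slice (List.replicate m v ++ t) none (some k)
          = List.replicate m v ++ t.take (k - (m : Int)).toNat := by
        rw [slice_to_toNat _ _ (by omega), List.take_append,
          List.take_of_length_le (by simp only [List.length_replicate]; omega)]
        simp only [List.length_replicate]
        congr 2
        omega
      have hslice' : PySem.List.slice t none (some (k - (m : Int)))
          = t.take (k - (m : Int)).toNat := slice_to_toNat _ _ (by omega)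
      simp only [hidx, hidx', hslice, hslice', List.count_append, List.count_replicate,
        beq_iff_eq]
      rw [if_neg (Ne.symm hwv)]
      simp

-- B lands inside the leading group, when 0 ≤ k < m
lemma bval_group_lt (m : Nat) (v : Int) (t : List Int) (k : Int)
    (hvt : v ∉ t) (h0 : 0 ≤ k) (hk : k < (m : Int)) :
    Bval (List.replicate m v ++ t) k = PySem.Int.mod ((Nat.choose m k.toNat : Nat) : Int) pvMOD := by
  unfold Bval
  by_cases hk0 : k = 0
  · subst hk0
    rw [if_pos (Or.inl le_rfl)]
    simp only [Int.toNat_zero, Nat.choose_zero_right, Nat.cast_one]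
    decide
  · rw [if_neg (by simp only [List.length_append, List.length_replicate]; push_cast; omega)]
    have hidx : PySem.List.pyGetD (List.replicate m v ++ t) (k - 1) 0 = v := by
      rw [pyGetD_toNat _ _ _ (by omega),
        List.getD_append _ _ _ _ (by simp only [List.length_replicate]; omega),
        List.getD_replicate _ (by omega)]
    have hslice : PySem.List.slice (List.replicate m v ++ t) none (some k)
        = List.replicate k.toNat v := by
      rw [slice_to_toNat _ _ h0,
        List.take_append_of_le_length (by simp only [List.length_replicate]; omega),
        List.take_replicate]
      congr 1
      omega
    simp only [hidx, hslice, List.count_append, List.count_replicate,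
      List.count_eq_zero.2 hvt, beq_self_eq_true, if_true, Nat.add_zero]

-- A's group loop equals B's direct computation, for any strictly-descending key list
-- enumerating the values of the nonincreasing list s, with c giving s's counts
lemma loop_eq (keys : List Int) (s : List Int) (k : Int) (c : PySem.Dict Int Int)
    (hc : ∀ x ∈ keys, c.getD x 0 = (s.count x : Int))
    (hs : s.Pairwise (fun a b => b ≤ a))
    (hk : keys.Pairwise (· > ·))
    (hmem : ∀ x, x ∈ keys ↔ x ∈ s)
    (h0 : 0 ≤ k) :
    solveLoop c keys k = Bval s k := by
  induction keys generalizing s k with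
  | nil =>
    have hsnil : s = [] := by
      cases s with
      | nil => rfl
      | cons y t => exact absurd ((hmem y).2 List.mem_cons_self) (by simp)
    subst hsnil
    rw [bval_nil]; rfl
  | cons v rest ih =>
    rcases List.pairwise_cons.1 hk with ⟨hvrest, hkrest⟩
    have hvs : v ∈ s := (hmem v).1 List.mem_cons_self
    set m := s.count v with hmdef
    have hm1 : 1 ≤ m := List.count_pos_iff.2 hvs
    have hmax : ∀ y ∈ s, y ≤ v := by
      intro y hy
      rcases List.mem_cons.1 ((hmem y).2 hy) with h | h
      · exact le_of_eq h
      · exact le_of_lt (hvrest y h)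
    obtain ⟨htake, hdrop⟩ := sorted_desc_group s v hs hmax
    set t := s.drop m with htdef
    have hsplit : s = List.replicate m v ++ t := by
      conv_lhs => rw [← List.take_append_drop m s]
      rw [htake]
    have hvnott : v ∉ t := fun h => lt_irrefl v (hdrop v h)
    have hcv : c.getD v 0 = (m : Int) := hc v List.mem_cons_self
    show (if c.getD v 0 ≤ k then solveLoop c rest (k - c.getD v 0)
          else PySem.Int.mod ((Nat.choose (c.getD v 0).toNat k.toNat : Nat) : Int) pvMOD) = Bval s k
    rw [hcv]
    by_cases hmk : (m : Int) ≤ k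
    · rw [if_pos hmk]
      have hrec : solveLoop c rest (k - m) = Bval t (k - m) := by
        apply ih
        · intro x hx
          have hxne : x ≠ v := ne_of_lt (hvrest x hx)
          have : s.count x = t.count x := by
            rw [hsplit, List.count_append, List.count_replicate]
            simp [Ne.symm hxne]
          rw [← this]; exact hc x (List.mem_cons_of_mem _ hx)
        · exact hs.sublist (hsplit ▸ (List.sublist_append_right _ _))
        · exact hkrest
        · intro x
          constructor
          · intro hx
            have hxne : x ≠ v := ne_of_lt (hvrest x hx)
            have hxs : x ∈ s := (hmem x).1 (List.mem_cons_of_mem v hx)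
            rcases List.mem_append.1 (hsplit ▸ hxs) with h | h
            · exact absurd (List.eq_of_mem_replicate h) hxne
            · exact h
          · intro hx
            have hxs : x ∈ s := hsplit ▸ List.mem_append.2 (Or.inr hx)
            rcases List.mem_cons.1 ((hmem x).2 hxs) with h | h
            · exact absurd (h ▸ hx) hvnott
            · exact h
        · omega
      rw [hrec, hsplit, bval_group_le m v t k hm1 hvnott hmk]
    · rw [if_neg hmk]
      replace hmk : k < (m : Int) := lt_of_not_ge hmk
      rw [hsplit, bval_group_lt m v t k hvnott h0 hmk]
      simp

-- ===== VERDICT (by name: the statement is the Claim_ definition above) =====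
theorem solve_spec : Claim_equal_solve := by
  intro n k a _hdom hpre
  unfold Spec_solve
  rcases hpre with h0 | hnil
  · rw [solve_alt_eq_Bval]
    show solveLoop (PySem.Dict.counter a)
        (PySem.List.sorted (PySem.Dict.counter a).keys (fun x => x) true) k = _
    apply loop_eq
    · intro x _
      rw [PySem.Dict.getD_counter]
      congr 1
      exact ((PySem.List.sorted_perm a (fun x => x) true).count_eq x).symm
    · simpa using PySem.List.sorted_pairwise_rev a (fun x => x)
    · have hnd : (PySem.List.sorted (PySem.Dict.counter a).keys (fun x => x) true).Nodup := by
        rw [PySem.Dict.keys_counter]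
        exact ((PySem.List.sorted_perm _ _ _).nodup_iff).2 (PySem.Set.nodup_ofList a)
      have hge := PySem.List.sorted_pairwise_rev (PySem.Dict.counter a).keys (fun x => x)
      exact (hge.and hnd).imp (fun h => lt_of_le_of_ne h.1 (Ne.symm h.2))
    · intro x
      rw [PySem.List.mem_sorted, PySem.Dict.keys_counter, PySem.Set.mem_ofList,
        PySem.List.mem_sorted]
    · exact h0
  · subst hnil
    rw [solve_alt_eq_Bval,
      show PySem.List.sorted ([] : List Int) (fun x => x) true = ([] : List Int) from rfl,
      bval_nil]
    rfl
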